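-- pv_equiv track=rewrite | github.com/joestalker1/leetcode | src/main/scala/algorithms/DynamicPrograming.py | find_arithm
-- ===== SOURCE A (Python) =====
-- def find_arithm(arr,i, x ,cur_path,need_sum):
--     if i == len(arr):
--         if x == need_sum:
--             return cur_path
--         return []
--     if i == 0:
--         return find_arithm(arr,i+1,arr[i],cur_path + [str(arr[i])],need_sum) or find_arithm(arr,i+1,arr[i],cur_path + [str(arr[i])],need_sum)
--     else:
--         return find_arithm(arr, i + 1, x-arr[i], cur_path + ['-',str(arr[i])], need_sum) or find_arithm(arr, i + 1, x+arr[i],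
--                                                                                                   cur_path + ['+',
--                                                                                                       str(arr[i])],
--                                                                                                   need_sum)
-- ===== SOURCE B (Python) =====
-- # Feasibility-oracle greedy instead of A's backtracking DFS: _feasible(j, s) answers (memoized)
-- # "can signs on arr[j:] drive s to need_sum"; _build COMMITS to one branch per step ('-' first,
-- # A's DFS order) and never backtracks, building the path once.
-- def _feasible(arr, j, s, need_sum, memo):
--     if j == len(arr):
--         return s == need_sum
--     key = (j, s)
--     if key in memo:
--         return memo[key]
--     a = arr[j]
--     r = _feasible(arr, j + 1, s - a, need_sum, memo) or _feasible(arr, j + 1, s + a, need_sum, memo)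
--     memo[key] = r
--     return r
--
-- def _build(arr, i, x, cur_path, need_sum, memo):
--     if i == len(arr):
--         return cur_path if x == need_sum else []
--     a = arr[i]
--     if i == 0:
--         return _build(arr, 1, a, cur_path + [str(a)], need_sum, memo)
--     if _feasible(arr, i + 1, x - a, need_sum, memo):
--         return _build(arr, i + 1, x - a, cur_path + ['-', str(a)], need_sum, memo)
--     return _build(arr, i + 1, x + a, cur_path + ['+', str(a)], need_sum, memo)
--
-- def find_arithm(arr, i, x, cur_path, need_sum):
--     return _build(arr, i, x, cur_path, need_sum, {})
-- ===== Notes on version B (the rewrite author's own statement) =====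
-- stated objective: alternative
-- what changed: Replaces A's backtracking DFS (which copies the path at every node and duplicates the whole search at i==0 via 'x or x') by a suffix-feasibility oracle memoized on (index, running sum) plus a committing reconstruction that picks '-' first (A's DFS order) and never backtracks, building the path once; intended as faster (a timing run measured 8.66x at the largest size both finished but could not confirm it as a label since both time out on some worst-case inputs).
-- outside the precondition, e.g. on find_arithm([1, 2], -1, 0, [], 3): A returns ['-', '2', '1', '+', '2'], B returns ['+', '2', '1', '+', '2']
import Mathlib
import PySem

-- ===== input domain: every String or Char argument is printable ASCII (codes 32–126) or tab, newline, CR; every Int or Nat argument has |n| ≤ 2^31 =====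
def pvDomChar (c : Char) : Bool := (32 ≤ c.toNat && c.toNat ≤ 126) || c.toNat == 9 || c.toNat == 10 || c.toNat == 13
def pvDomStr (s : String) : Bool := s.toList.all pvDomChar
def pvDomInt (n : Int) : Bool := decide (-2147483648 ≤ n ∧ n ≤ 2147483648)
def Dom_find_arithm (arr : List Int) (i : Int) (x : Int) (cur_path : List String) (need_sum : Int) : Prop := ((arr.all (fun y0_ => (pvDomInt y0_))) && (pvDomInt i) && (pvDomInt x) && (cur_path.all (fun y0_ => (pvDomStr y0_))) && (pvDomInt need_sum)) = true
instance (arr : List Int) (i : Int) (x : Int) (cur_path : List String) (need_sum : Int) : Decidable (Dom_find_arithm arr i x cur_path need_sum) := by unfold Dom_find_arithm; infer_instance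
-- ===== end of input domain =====

-- B replaces A's backtracking path-copying DFS by a memoized suffix-feasibility oracle on
-- (index, running sum) plus a committing reconstruction ('-' tried first, matching A's DFS
-- order); same return value on Pre_.

-- ===== PORT A =====
-- fuel = (len - i).toNat + 1 makes A's recursion structural (kernel-reducible); it only guards
-- termination: with the wrapper's fuel the 0-fuel branch is never reached.
def find_arithmF : Nat → List Int → Int → Int → List String → Int → List String
  | 0, _, _, _, _, _ => []
  | fuel + 1, arr, i, x, cur_path, need_sum =>
    if i = (arr.length : Int) then
      if x = need_sum then cur_path else []
    else if i = 0 then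
      match PySem.List.pyGet? arr i with
      | none => []   -- Python raises IndexError here (excluded by Pre_)
      | some a =>
        let r1 := find_arithmF fuel arr (i + 1) a (cur_path ++ [PySem.Int.toStr a]) need_sum
        -- Python 'or': first operand unless it is the empty (falsy) list
        if r1.isEmpty then find_arithmF fuel arr (i + 1) a (cur_path ++ [PySem.Int.toStr a]) need_sum else r1
    else
      match PySem.List.pyGet? arr i with
      | none => []   -- Python raises IndexError here (excluded by Pre_)
      | some a =>
        let r1 := find_arithmF fuel arr (i + 1) (x - a) (cur_path ++ ["-", PySem.Int.toStr a]) need_sum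
        if r1.isEmpty then find_arithmF fuel arr (i + 1) (x + a) (cur_path ++ ["+", PySem.Int.toStr a]) need_sum else r1

def find_arithm (arr : List Int) (i : Int) (x : Int) (cur_path : List String) (need_sum : Int) : List String :=
  find_arithmF (((arr.length : Int) - i).toNat + 1) arr i x cur_path need_sum

-- ===== PORT B =====
-- _feasible of Source B: memoized suffix feasibility — can signs on arr[j:] drive s to need_sum.
-- fuel = (len - j).toNat + 1 makes the recursion structural (kernel-reducible); it only guards
-- termination: with the wrapper's fuel the 0-fuel branch is never reached.
def pvFeasMemoF : Nat → List Int → Int → Int → Int → PySem.Dict (Int × Int) Bool → Bool × PySem.Dict (Int × Int) Bool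
  | 0, _, _, _, _, memo => (false, memo)
  | fuel + 1, arr, j, s, need_sum, memo =>
    if j = (arr.length : Int) then (s == need_sum, memo)
    else
      match PySem.Dict.get? memo (j, s) with
      | some v => (v, memo)
      | none =>
        match PySem.List.pyGet? arr j with
        | none => (false, memo)   -- Python raises IndexError here (only reachable outside Pre_)
        | some a =>
          match pvFeasMemoF fuel arr (j + 1) (s - a) need_sum memo with
          | (r1, m1) =>
            -- Python 'or' short-circuits: the '+' branch runs only if the '-' branch failed
            if r1 then (true, PySem.Dict.insert m1 (j, s) true)
            else
              match pvFeasMemoF fuel arr (j + 1) (s + a) need_sum m1 with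
              | (r2, m2) => (r2, PySem.Dict.insert m2 (j, s) r2)

def pvFeasMemo (arr : List Int) (j : Int) (s : Int) (need_sum : Int)
    (memo : PySem.Dict (Int × Int) Bool) : Bool × PySem.Dict (Int × Int) Bool :=
  pvFeasMemoF (((arr.length : Int) - j).toNat + 1) arr j s need_sum memo

-- _build of Source B: commit to one branch per step, threading the shared memo (same fuel device)
def pvBuildF : Nat → List Int → Int → Int → List String → Int → PySem.Dict (Int × Int) Bool → List String
  | 0, _, _, _, _, _, _ => []
  | fuel + 1, arr, i, x, cur_path, need_sum, memo =>
    if i = (arr.length : Int) then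
      if x = need_sum then cur_path else []
    else
      match PySem.List.pyGet? arr i with
      | none => []   -- Python raises IndexError here (excluded by Pre_)
      | some a =>
        if i = 0 then
          pvBuildF fuel arr 1 a (cur_path ++ [PySem.Int.toStr a]) need_sum memo
        else
          match pvFeasMemo arr (i + 1) (x - a) need_sum memo with
          | (ok, m') =>
            if ok then
              pvBuildF fuel arr (i + 1) (x - a) (cur_path ++ ["-", PySem.Int.toStr a]) need_sum m'
            else
              pvBuildF fuel arr (i + 1) (x + a) (cur_path ++ ["+", PySem.Int.toStr a]) need_sum m'

def find_arithm_alt (arr : List Int) (i : Int) (x : Int) (cur_path : List String) (need_sum : Int) : List String :=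
  pvBuildF (((arr.length : Int) - i).toNat + 1) arr i x cur_path need_sum PySem.Dict.empty

-- ===== PRECONDITION & SPEC =====
-- Pre_ excludes i > len(arr), where A raises IndexError, and i < 0, where A's value comes from
-- Python's accidental negative-index wraparound (it prepends '-' tokens for the wrapped tail and
-- then resets the running sum on reaching index 0).
def Pre_find_arithm (arr : List Int) (i : Int) (x : Int) (cur_path : List String) (need_sum : Int) : Prop :=
  0 ≤ i ∧ i ≤ arr.length
instance (arr : List Int) (i : Int) (x : Int) (cur_path : List String) (need_sum : Int) : Decidable (Pre_find_arithm arr i x cur_path need_sum) := by unfold Pre_find_arithm; infer_instance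
def pvWitness_find_arithm : List Int × Int × Int × List String × Int := ([1, 2], 0, 0, [], 3)

def Spec_find_arithm (arr : List Int) (i : Int) (x : Int) (cur_path : List String) (need_sum : Int) (out : List String) : Prop := out = find_arithm_alt arr i x cur_path need_sum
instance (arr : List Int) (i : Int) (x : Int) (cur_path : List String) (need_sum : Int) (out : List String) : Decidable (Spec_find_arithm arr i x cur_path need_sum out) := by unfold Spec_find_arithm; infer_instance

-- ===== CLAIM (what is proved, stated in full; the proofs are below) =====
def Claim_equal_find_arithm : Prop := ∀ (arr : List Int) (i : Int) (x : Int) (cur_path : List String) (need_sum : Int), Dom_find_arithm arr i x cur_path need_sum → Pre_find_arithm arr i x cur_path need_sum → Spec_find_arithm arr i x cur_path need_sum (find_arithm arr i x cur_path need_sum)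

-- ===== LEMMAS AND PROOFS =====

theorem pv_pyGet?_some_lt {xs : List Int} {i : Int} {a : Int}
    (h : PySem.List.pyGet? xs i = some a) : i < xs.length := by
  by_contra hc
  have : PySem.List.pyGet? xs i = none := by
    rw [PySem.List.pyGet?_eq_none_iff]
    intro hin
    exact hc hin.2
  simp [this] at h

-- proof-only reference: UNmemoized suffix feasibility (what each memo entry means)
def pvFeasibleF : Nat → List Int → Int → Int → Int → Bool
  | 0, _, _, _, _ => false
  | fuel + 1, arr, j, s, need_sum =>
    if j = (arr.length : Int) then s == need_sum
    else
      match PySem.List.pyGet? arr j with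
      | none => false
      | some a => pvFeasibleF fuel arr (j + 1) (s - a) need_sum || pvFeasibleF fuel arr (j + 1) (s + a) need_sum

def pvFeasible (arr : List Int) (j : Int) (s : Int) (need_sum : Int) : Bool :=
  pvFeasibleF (((arr.length : Int) - j).toNat + 1) arr j s need_sum

theorem pvFeasible_len (arr : List Int) (s need_sum : Int) :
    pvFeasible arr (arr.length : Int) s need_sum = (s == need_sum) := by
  have hfuel : (((arr.length : Int) - (arr.length : Int)).toNat + 1) = 1 := by omega
  unfold pvFeasible
  rw [hfuel]
  simp [pvFeasibleF]

theorem pvFeasible_none (arr : List Int) (j s need_sum : Int)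
    (hne : j ≠ (arr.length : Int)) (hget : PySem.List.pyGet? arr j = none) :
    pvFeasible arr j s need_sum = false := by
  unfold pvFeasible
  rw [pvFeasibleF, if_neg hne]
  split
  next => rfl
  next a heq => rw [hget] at heq; cases heq

theorem pvFeasible_step (arr : List Int) (j s need_sum : Int) (a : Int)
    (hne : j ≠ (arr.length : Int)) (hget : PySem.List.pyGet? arr j = some a) :
    pvFeasible arr j s need_sum
      = (pvFeasible arr (j + 1) (s - a) need_sum || pvFeasible arr (j + 1) (s + a) need_sum) := by
  have hj : j < arr.length := pv_pyGet?_some_lt hget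
  have hfuel : (((arr.length : Int) - j).toNat + 1)
      = ((((arr.length : Int) - (j + 1)).toNat + 1) + 1) := by omega
  unfold pvFeasible
  rw [hfuel]
  conv_lhs => rw [pvFeasibleF]
  rw [if_neg hne]
  split
  next heq => rw [hget] at heq; cases heq
  next a' heq =>
    rw [hget] at heq
    injection heq with heq
    subst heq
    rfl

-- every memo entry states the unmemoized feasibility of its key
def pvValid (arr : List Int) (need_sum : Int) (m : PySem.Dict (Int × Int) Bool) : Prop :=
  ∀ (p : Int × Int) (b : Bool), PySem.Dict.get? m p = some b → b = pvFeasible arr p.1 p.2 need_sum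

theorem pvValid_empty (arr : List Int) (need_sum : Int) : pvValid arr need_sum PySem.Dict.empty := by
  intro p b h
  rw [PySem.Dict.get?_empty] at h
  cases h

theorem pvValid_insert (arr : List Int) (need_sum : Int) (m : PySem.Dict (Int × Int) Bool)
    (hm : pvValid arr need_sum m) (j s : Int) (b : Bool)
    (hb : b = pvFeasible arr j s need_sum) :
    pvValid arr need_sum (PySem.Dict.insert m (j, s) b) := by
  intro p v h
  rw [PySem.Dict.get?_insert] at h
  by_cases hp : p = (j, s)
  · rw [if_pos hp] at h
    injection h with h
    subst h
    rw [hp]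
    exact hb
  · rw [if_neg hp] at h
    exact hm p v h

-- the memoized oracle computes the unmemoized feasibility and preserves memo validity
theorem pvFeasMemo_correct (arr : List Int) (need_sum : Int) :
    ∀ (k : Nat) (j s : Int) (m : PySem.Dict (Int × Int) Bool),
      ((arr.length : Int) - j).toNat = k → pvValid arr need_sum m →
      (pvFeasMemo arr j s need_sum m).1 = pvFeasible arr j s need_sum ∧
        pvValid arr need_sum (pvFeasMemo arr j s need_sum m).2 := by
  intro k
  induction k with
  | zero =>
    intro j s m hk hm
    unfold pvFeasMemo
    rw [hk]
    rw [pvFeasMemoF]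
    by_cases hne : j = (arr.length : Int)
    · rw [if_pos hne]
      subst hne
      rw [pvFeasible_len]
      exact ⟨rfl, hm⟩
    · rw [if_neg hne]
      have hgt : (arr.length : Int) ≤ j := by omega
      have hget : PySem.List.pyGet? arr j = none := by
        rw [PySem.List.pyGet?_eq_none_iff]
        intro hin
        have := hin.2
        omega
      split
      next v hv => exact ⟨hm (j, s) v hv, hm⟩
      next =>
        split
        next => rw [pvFeasible_none arr j s need_sum hne hget]; exact ⟨rfl, hm⟩
        next a heq => rw [hget] at heq; cases heq
  | succ k ih =>
    intro j s m hk hm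
    have hj : j < arr.length := by omega
    have hne : j ≠ (arr.length : Int) := by omega
    unfold pvFeasMemo
    rw [hk]
    rw [pvFeasMemoF]
    rw [if_neg hne]
    split
    next v hv => exact ⟨hm (j, s) v hv, hm⟩
    next =>
      split
      next hget => rw [pvFeasible_none arr j s need_sum hne hget]; exact ⟨rfl, hm⟩
      next a hget =>
        have hstep := pvFeasible_step arr j s need_sum a hne hget
        have hw1 : pvFeasMemoF (k + 1) arr (j + 1) (s - a) need_sum m
            = pvFeasMemo arr (j + 1) (s - a) need_sum m := by
          unfold pvFeasMemo
          rw [show (((arr.length : Int) - (j + 1)).toNat) = k from by omega]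
        split
        next r1 m1 heq1 =>
          rw [hw1] at heq1
          have h1 := ih (j + 1) (s - a) m (by omega) hm
          rw [heq1] at h1
          obtain ⟨h1v, h1m⟩ := h1
          by_cases hr1 : r1 = true
          · rw [if_pos hr1]
            subst hr1
            constructor
            · rw [hstep, ← h1v]; simp
            · exact pvValid_insert arr need_sum m1 h1m j s true (by rw [hstep, ← h1v]; simp)
          · rw [if_neg hr1]
            have hr1f : r1 = false := by cases r1 <;> simp_all
            have hw2 : pvFeasMemoF (k + 1) arr (j + 1) (s + a) need_sum m1
                = pvFeasMemo arr (j + 1) (s + a) need_sum m1 := by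
              unfold pvFeasMemo
              rw [show (((arr.length : Int) - (j + 1)).toNat) = k from by omega]
            split
            next r2 m2 heq2 =>
              rw [hw2] at heq2
              have h2 := ih (j + 1) (s + a) m1 (by omega) h1m
              rw [heq2] at h2
              obtain ⟨h2v, h2m⟩ := h2
              have hval : r2 = pvFeasible arr j s need_sum := by
                rw [hstep, ← h1v, ← h2v, hr1f]
                simp
              exact ⟨hval, pvValid_insert arr need_sum m2 h2m j s r2 hval⟩

-- unfold lemmas for pvBuildF at a base / in-range positive index
theorem pvBuildF_base (fuel : Nat) (arr : List Int) (x : Int) (res : List String) (need_sum : Int)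
    (m : PySem.Dict (Int × Int) Bool) :
    pvBuildF (fuel + 1) arr (arr.length : Int) x res need_sum m = (if x = need_sum then res else []) := by
  rw [pvBuildF, if_pos rfl]

theorem pvBuildF_step (fuel : Nat) (arr : List Int) (need_sum : Int) (j : Nat) (s : Int)
    (res : List String) (m : PySem.Dict (Int × Int) Bool) (ok : Bool) (m' : PySem.Dict (Int × Int) Bool)
    (h1 : 1 ≤ j) (hj : j < arr.length)
    (hF : pvFeasMemo arr ((j + 1 : Nat) : Int) (s - arr[j]) need_sum m = (ok, m')) :
    pvBuildF (fuel + 1) arr (j : Int) s res need_sum m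
      = (if ok then pvBuildF fuel arr ((j + 1 : Nat) : Int) (s - arr[j]) (res ++ ["-", PySem.Int.toStr arr[j]]) need_sum m'
        else pvBuildF fuel arr ((j + 1 : Nat) : Int) (s + arr[j]) (res ++ ["+", PySem.Int.toStr arr[j]]) need_sum m') := by
  have hne : (j : Int) ≠ (arr.length : Int) := by exact_mod_cast (by omega : j ≠ arr.length)
  have hnz : (j : Int) ≠ 0 := by exact_mod_cast (by omega : j ≠ 0)
  have hget : PySem.List.pyGet? arr (j : Int) = some arr[j] := by
    rw [PySem.List.pyGet?_natCast]
    exact List.getElem?_eq_getElem hj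
  have hcast : (j : Int) + 1 = ((j + 1 : Nat) : Int) := by push_cast; ring
  rw [pvBuildF, if_neg hne]
  split
  next heq => rw [hget] at heq; cases heq
  next a heq =>
    rw [hget] at heq
    injection heq with heq
    subst heq
    rw [if_neg hnz, hcast]
    split
    next ok' m'' heq' =>
      rw [hF] at heq'
      injection heq' with e1 e2
      subst e1; subst e2
      rfl

theorem pvBuildF_zero (fuel : Nat) (arr : List Int) (x : Int) (res : List String) (need_sum : Int)
    (m : PySem.Dict (Int × Int) Bool) (hpos : 0 < arr.length) :
    pvBuildF (fuel + 1) arr (0 : Int) x res need_sum m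
      = pvBuildF fuel arr 1 (arr[0]'hpos) (res ++ [PySem.Int.toStr (arr[0]'hpos)]) need_sum m := by
  have hne : (0 : Int) ≠ (arr.length : Int) := by exact_mod_cast (by omega : (0 : Nat) ≠ arr.length)
  have hget : PySem.List.pyGet? arr (0 : Int) = some (arr[0]'hpos) := by
    have h' : PySem.List.pyGet? arr ((0 : Nat) : Int) = arr[(0 : Nat)]? := PySem.List.pyGet?_natCast arr 0
    simpa [List.getElem?_eq_getElem hpos] using h'
  rw [pvBuildF, if_neg hne]
  split
  next heq => rw [hget] at heq; cases heq
  next a heq =>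
    rw [hget] at heq
    injection heq with heq
    subst heq
    rw [if_pos rfl]

-- pvBuildF returns [] exactly when the suffix is infeasible (nonempty accumulator, index ≥ 1)
theorem pvBuildF_empty_iff (arr : List Int) (need_sum : Int) :
    ∀ (k j : Nat) (s : Int) (res : List String) (m : PySem.Dict (Int × Int) Bool),
      arr.length - j = k → 1 ≤ j → j ≤ arr.length → res ≠ [] → pvValid arr need_sum m →
      (pvBuildF (k + 1) arr (j : Int) s res need_sum m = [] ↔ pvFeasible arr (j : Int) s need_sum = false) := by
  intro k
  induction k with
  | zero =>
    intro j s res m hk h1 hle hres hm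
    have hj : j = arr.length := by omega
    subst hj
    rw [pvBuildF_base, pvFeasible_len]
    by_cases hs : s = need_sum <;> simp [hs, hres]
  | succ k ih =>
    intro j s res m hk h1 hle hres hm
    have hj : j < arr.length := by omega
    have hne : (j : Int) ≠ (arr.length : Int) := by exact_mod_cast (by omega : j ≠ arr.length)
    have hget : PySem.List.pyGet? arr (j : Int) = some arr[j] := by
      rw [PySem.List.pyGet?_natCast]
      exact List.getElem?_eq_getElem hj
    have hcast : (j : Int) + 1 = ((j + 1 : Nat) : Int) := by push_cast; ring
    obtain ⟨ok, m', hF⟩ : ∃ ok m', pvFeasMemo arr ((j + 1 : Nat) : Int) (s - arr[j]) need_sum m = (ok, m') :=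
      ⟨_, _, rfl⟩
    have hc := pvFeasMemo_correct arr need_sum (arr.length - (j + 1)) ((j + 1 : Nat) : Int) (s - arr[j]) m
      (by push_cast; omega) hm
    rw [hF] at hc
    obtain ⟨hokv, hm'⟩ := hc
    rw [pvBuildF_step (k + 1) arr need_sum j s res m ok m' h1 hj hF]
    rw [pvFeasible_step arr (j : Int) s need_sum arr[j] hne hget, hcast]
    by_cases hok : ok = true
    · rw [if_pos hok]
      have h2 := ih (j + 1) (s - arr[j]) (res ++ ["-", PySem.Int.toStr arr[j]]) m' (by omega) (by omega) (by omega) (by simp) hm'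
      rw [h2, ← hokv, hok]
      simp
    · rw [if_neg hok]
      have hokf : pvFeasible arr ((j + 1 : Nat) : Int) (s - arr[j]) need_sum = false := by
        rw [← hokv]; cases ok <;> simp_all
      have h2 := ih (j + 1) (s + arr[j]) (res ++ ["+", PySem.Int.toStr arr[j]]) m' (by omega) (by omega) (by omega) (by simp) hm'
      rw [h2, hokf]
      simp

-- A (at exact fuel) from a positive index equals the committing reconstruction
theorem find_arithmF_eq_pvBuildF (arr : List Int) (need_sum : Int) :
    ∀ (k j : Nat) (s : Int) (p : List String) (m : PySem.Dict (Int × Int) Bool),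
      arr.length - j = k → 1 ≤ j → j ≤ arr.length → pvValid arr need_sum m →
      find_arithmF (k + 1) arr (j : Int) s p need_sum = pvBuildF (k + 1) arr (j : Int) s p need_sum m := by
  intro k
  induction k with
  | zero =>
    intro j s p m hk h1 h2 hm
    have hj : j = arr.length := by omega
    subst hj
    rw [pvBuildF_base]
    simp [find_arithmF]
  | succ k ih =>
    intro j s p m hk h1 h2 hm
    have hj : j < arr.length := by omega
    have hne : (j : Int) ≠ (arr.length : Int) := by exact_mod_cast (by omega : j ≠ arr.length)
    have hnz : (j : Int) ≠ 0 := by exact_mod_cast (by omega : j ≠ 0)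
    have hget : PySem.List.pyGet? arr (j : Int) = some arr[j] := by
      rw [PySem.List.pyGet?_natCast]
      exact List.getElem?_eq_getElem hj
    have hcast : (j : Int) + 1 = ((j + 1 : Nat) : Int) := by push_cast; ring
    obtain ⟨ok, m', hF⟩ : ∃ ok m', pvFeasMemo arr ((j + 1 : Nat) : Int) (s - arr[j]) need_sum m = (ok, m') :=
      ⟨_, _, rfl⟩
    have hc := pvFeasMemo_correct arr need_sum (arr.length - (j + 1)) ((j + 1 : Nat) : Int) (s - arr[j]) m
      (by push_cast; omega) hm
    rw [hF] at hc
    obtain ⟨hokv, hm'⟩ := hc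
    rw [pvBuildF_step (k + 1) arr need_sum j s p m ok m' h1 hj hF]
    conv_lhs => rw [find_arithmF]
    rw [if_neg hne, if_neg hnz]
    have hminus := ih (j + 1) (s - arr[j]) (p ++ ["-", PySem.Int.toStr arr[j]]) m' (by omega) (by omega) (by omega) hm'
    have hplus := ih (j + 1) (s + arr[j]) (p ++ ["+", PySem.Int.toStr arr[j]]) m' (by omega) (by omega) (by omega) hm'
    have hemp := pvBuildF_empty_iff arr need_sum k (j + 1) (s - arr[j])
      (p ++ ["-", PySem.Int.toStr arr[j]]) m' (by omega) (by omega) (by omega) (by simp) hm'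
    split
    next heq => rw [hget] at heq; cases heq
    next a heq =>
      rw [hget] at heq
      injection heq with heq
      subst heq
      rw [hcast, hminus, hplus]
      by_cases hok : ok = true
      · have hfeastrue : pvFeasible arr ((j + 1 : Nat) : Int) (s - arr[j]) need_sum = true := by
          rw [← hokv, hok]
        have hne' : pvBuildF (k + 1) arr ((j + 1 : Nat) : Int) (s - arr[j]) (p ++ ["-", PySem.Int.toStr arr[j]]) need_sum m' ≠ [] := by
          intro hc2; rw [hemp] at hc2; rw [hfeastrue] at hc2; exact absurd hc2 (by decide)
        rw [if_pos hok, if_neg (fun hc2 => hne' (List.isEmpty_iff.mp hc2))]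
      · have hfeasfalse : pvFeasible arr ((j + 1 : Nat) : Int) (s - arr[j]) need_sum = false := by
          rw [← hokv]; cases ok <;> simp_all
        have he : pvBuildF (k + 1) arr ((j + 1 : Nat) : Int) (s - arr[j]) (p ++ ["-", PySem.Int.toStr arr[j]]) need_sum m' = [] := by
          rw [hemp]; exact hfeasfalse
        rw [if_neg hok, if_pos (List.isEmpty_iff.mpr he)]

-- ===== VERDICT (by name: the statement is the Claim_ definition above) =====
theorem find_arithm_spec : Claim_equal_find_arithm := by
  intro arr i x cur_path need_sum _ hPre
  obtain ⟨h0, hlen⟩ := hPre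
  unfold Spec_find_arithm find_arithm_alt
  by_cases hz : i = 0 ∧ 0 < arr.length
  · obtain ⟨hi0, hpos⟩ := hz
    subst hi0
    unfold find_arithm
    have hfuelA : (((arr.length : Int) - (0 : Int)).toNat + 1) = ((arr.length - 1) + 1) + 1 := by omega
    rw [hfuelA]
    have hne : (0 : Int) ≠ (arr.length : Int) := by exact_mod_cast (by omega : (0 : Nat) ≠ arr.length)
    have hget : PySem.List.pyGet? arr (0 : Int) = some (arr[0]'hpos) := by
      have h' : PySem.List.pyGet? arr ((0 : Nat) : Int) = arr[(0 : Nat)]? := PySem.List.pyGet?_natCast arr 0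
      simpa [List.getElem?_eq_getElem hpos] using h'
    have hc : (0 : Int) + 1 = ((1 : Nat) : Int) := by norm_num
    have hone : (1 : Int) = ((1 : Nat) : Int) := by norm_num
    have h1 := find_arithmF_eq_pvBuildF arr need_sum (arr.length - 1) 1 (arr[0]'hpos)
      (cur_path ++ [PySem.Int.toStr (arr[0]'hpos)]) PySem.Dict.empty (by omega) (by omega) (by omega)
      (pvValid_empty arr need_sum)
    rw [pvBuildF_zero ((arr.length - 1) + 1) arr x cur_path need_sum PySem.Dict.empty hpos]
    conv_lhs => rw [find_arithmF]
    rw [if_neg hne, if_pos rfl]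
    split
    next heq => rw [hget] at heq; cases heq
    next a heq =>
      rw [hget] at heq
      injection heq with heq
      subst heq
      rw [hc, hone, h1]
      exact ite_self _
  · by_cases hil : i = (arr.length : Int)
    · subst hil
      unfold find_arithm
      have hfuelA : (((arr.length : Int) - (arr.length : Int)).toNat + 1) = 1 := by omega
      rw [hfuelA, pvBuildF_base]
      simp [find_arithmF]
    · -- here 0 < i < arr.length
      have hipos : 0 < i := by
        rcases (by omega : i = 0 ∨ 0 < i) with h | h
        · exfalso; exact hz ⟨h, by omega⟩
        · exact h
      have hrep : i = ((i.toNat : Nat) : Int) := by omega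
      rw [hrep]
      unfold find_arithm
      have hfuelA : (((arr.length : Int) - ((i.toNat : Nat) : Int)).toNat + 1) = (arr.length - i.toNat) + 1 := by omega
      rw [hfuelA]
      exact find_arithmF_eq_pvBuildF arr need_sum (arr.length - i.toNat) i.toNat x cur_path
        PySem.Dict.empty rfl (by omega) (by omega) (pvValid_empty arr need_sum)
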